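-- pv_equiv track=rewrite | github.com/cbonnalie/Advent2025 | day6/part1.py | get_num_lengths
-- ===== SOURCE A (Python) =====
-- def get_num_lengths(input_text):
--     num_lengths = []
--     operands = input_text[-1]
--     length = 0
--     for char in operands:
--         if char == '*' or char == '+':
--             if length > 0:
--                 num_lengths.append(length)
--             length = 0
--         else:
--             length += 1
--     length += 1
--     num_lengths.append(length)
--     return num_lengths
-- ===== SOURCE B (Python) =====
-- def get_num_lengths(input_text):
--     segments = input_text[-1].replace('+', '*').split('*')
--     return [len(s) for s in segments[:-1] if s] + [len(segments[-1]) + 1]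
-- ===== Notes on version B (the rewrite author's own statement) =====
-- stated objective: simpler
-- what changed: Replaces the char-by-char accumulator loop with a normalize-then-split pass: map '+' to '*', split the operand string on '*', keep the lengths of the nonempty interior segments and append the last segment's length + 1.
-- outside the precondition, e.g. on get_num_lengths([]): A raises IndexError, B raises IndexError
import Mathlib
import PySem

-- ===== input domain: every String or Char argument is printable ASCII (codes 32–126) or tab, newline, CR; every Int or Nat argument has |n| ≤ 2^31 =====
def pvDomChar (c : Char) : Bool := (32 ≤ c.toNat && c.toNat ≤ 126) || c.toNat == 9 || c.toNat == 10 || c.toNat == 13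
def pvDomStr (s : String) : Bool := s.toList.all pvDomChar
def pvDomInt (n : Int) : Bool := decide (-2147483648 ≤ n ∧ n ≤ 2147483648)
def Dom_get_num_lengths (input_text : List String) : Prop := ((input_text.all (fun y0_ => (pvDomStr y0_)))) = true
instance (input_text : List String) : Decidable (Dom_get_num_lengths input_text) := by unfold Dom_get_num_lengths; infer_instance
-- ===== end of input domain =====

-- B replaces A's char-by-char accumulator loop with a split-into-segments pass
-- (normalize '+' to '*', split on '*', map lengths); objective: simpler.

-- ===== PORT A =====
-- the loop body: state (num_lengths, length)
def pvStepA (st : List Int × Int) (c : Char) : List Int × Int :=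
  if c = '*' ∨ c = '+' then
    (if st.2 > 0 then st.1 ++ [st.2] else st.1, 0)
  else (st.1, st.2 + 1)

def get_num_lengths (input_text : List String) : List Int :=
  -- operands = input_text[-1]; Pre_ excludes [], where Python raises IndexError
  let operands := (PySem.List.pyGet? input_text (-1)).getD ""
  let st := operands.toList.foldl pvStepA ([], 0)
  st.1 ++ [st.2 + 1]

-- ===== PORT B =====
def get_num_lengths_alt (input_text : List String) : List Int :=
  let operands := (PySem.List.pyGet? input_text (-1)).getD ""
  -- .replace('+', '*') with single-char old/new is exactly this per-character map;
  -- .split('*') is List.splitOn '*'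
  let segments := (operands.toList.map (fun c => if c = '+' then '*' else c)).splitOn '*'
  (segments.dropLast.filter (fun s => !s.isEmpty)).map (fun s => (s.length : Int))
    ++ [((segments.getLastD []).length : Int) + 1]

-- ===== PRECONDITION & SPEC =====
-- Pre_ excludes only the empty list, on which A raises IndexError (input_text[-1]).
def Pre_get_num_lengths (input_text : List String) : Prop := input_text ≠ []
instance (input_text : List String) : Decidable (Pre_get_num_lengths input_text) := by unfold Pre_get_num_lengths; infer_instance
def pvWitness_get_num_lengths : List String := ["12*34+5"]
def Spec_get_num_lengths (input_text : List String) (out : List Int) : Prop := out = get_num_lengths_alt input_text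
instance (input_text : List String) (out : List Int) : Decidable (Spec_get_num_lengths input_text out) := by unfold Spec_get_num_lengths; infer_instance

-- ===== CLAIM (what is proved, stated in full; the proofs are below) =====
def Claim_equal_get_num_lengths : Prop := ∀ (input_text : List String), Dom_get_num_lengths input_text → Pre_get_num_lengths input_text → Spec_get_num_lengths input_text (get_num_lengths input_text)

-- ===== LEMMAS AND PROOFS =====

-- the segments B splits the operand string into
def pvSegs (cs : List Char) : List (List Char) :=
  (cs.map (fun c => if c = '+' then '*' else c)).splitOn '*'

-- B's result expressed as a recursion over the segment list, with the pending
-- length `len` folded into the first segment (interior segments of positive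
-- length are kept; the last one gets the unconditional +1)
def pvBuild (len : Int) : List (List Char) → List Int
  | [] => [len + 1]
  | [s] => [len + (s.length : Int) + 1]
  | s :: rest => (if len + (s.length : Int) > 0 then [len + (s.length : Int)] else []) ++ pvBuild 0 rest

theorem pvSegs_nil : pvSegs [] = [[]] := rfl

theorem pvSegs_cons_sep (c : Char) (cs : List Char) (h : c = '*' ∨ c = '+') :
    pvSegs (c :: cs) = [] :: pvSegs cs := by
  rcases h with h | h <;> subst h <;> simp [pvSegs, List.splitOn, List.splitOnP_cons]

theorem pvSegs_cons_not_sep (c : Char) (cs : List Char) (h : ¬ (c = '*' ∨ c = '+')) :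
    pvSegs (c :: cs) = (pvSegs cs).modifyHead (List.cons c) := by
  push Not at h
  simp [pvSegs, List.splitOn, List.splitOnP_cons, h.1, h.2]

theorem pvSegs_ne_nil (cs : List Char) : pvSegs cs ≠ [] :=
  List.splitOnP_ne_nil _ _

-- pvBuild on the head-extended first segment absorbs one unit of pending length
theorem pvBuild_modifyHead (len : Int) (c : Char) (s : List Char) (rest : List (List Char)) :
    pvBuild len ((c :: s) :: rest) = pvBuild (len + 1) (s :: rest) := by
  cases rest with
  | nil => simp [pvBuild]; ring
  | cons t ts =>
      have : ((c :: s).length : Int) = (s.length : Int) + 1 := by push_cast [List.length_cons]; ring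
      simp only [pvBuild, this]
      have h : len + ((s.length : Int) + 1) = len + 1 + (s.length : Int) := by ring
      rw [h]

-- A's loop, started at (acc, len), produces acc ++ pvBuild len (segments)
theorem loopA_eq_build (cs : List Char) (acc : List Int) (len : Int) :
    (cs.foldl pvStepA (acc, len)).1 ++ [(cs.foldl pvStepA (acc, len)).2 + 1]
      = acc ++ pvBuild len (pvSegs cs) := by
  induction cs generalizing acc len with
  | nil => simp [pvSegs_nil, pvBuild]
  | cons c cs ih =>
      by_cases h : c = '*' ∨ c = '+'
      · rw [pvSegs_cons_sep c cs h]
        have hstep : pvStepA (acc, len) c =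
            (if len > 0 then acc ++ [len] else acc, 0) := by
          simp [pvStepA, h]
        rw [List.foldl_cons, hstep, ih]
        rcases hs : pvSegs cs with _ | ⟨s, rest⟩
        · exact absurd hs (pvSegs_ne_nil cs)
        · simp only [pvBuild]
          split_ifs with h1 h2 h2 <;> simp_all <;> omega
      · rw [pvSegs_cons_not_sep c cs h]
        have hstep : pvStepA (acc, len) c = (acc, len + 1) := by
          simp [pvStepA, h]
        rw [List.foldl_cons, hstep, ih]
        rcases hs : pvSegs cs with _ | ⟨s, rest⟩
        · exact absurd hs (pvSegs_ne_nil cs)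
        · rw [List.modifyHead_cons, pvBuild_modifyHead]

-- pvBuild 0 of a nonempty segment list is exactly B's filter/map/last expression
theorem build_zero (segs : List (List Char)) (h : segs ≠ []) :
    pvBuild 0 segs
      = (segs.dropLast.filter (fun s => !s.isEmpty)).map (fun s => (s.length : Int))
        ++ [((segs.getLastD []).length : Int) + 1] := by
  induction segs with
  | nil => exact absurd rfl h
  | cons s rest ih =>
      cases rest with
      | nil => simp [pvBuild]
      | cons t ts =>
          have hres : pvBuild 0 (s :: t :: ts)
              = (if (0 : Int) + (s.length : Int) > 0 then [(0 : Int) + (s.length : Int)] else [])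
                ++ pvBuild 0 (t :: ts) := rfl
          rw [hres, ih (by simp)]
          have hlast : (s :: t :: ts).getLastD ([] : List Char) = (t :: ts).getLastD [] := by
            simp [List.getLastD]
          rw [hlast]
          by_cases hs : s.isEmpty
          · have : s = [] := by simpa [List.isEmpty_iff] using hs
            subst this; simp
          · have hne : s ≠ [] := by simpa [List.isEmpty_iff] using hs
            have hpos : (0 : Int) + (s.length : Int) > 0 := by
              have : 0 < s.length := List.length_pos_of_ne_nil hne
              omega
            have : 0 < s.length := List.length_pos_of_ne_nil hne
            simp [hs, this]

-- ===== VERDICT (by name: the statement is the Claim_ definition above) =====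
theorem get_num_lengths_spec : Claim_equal_get_num_lengths := by
  intro input_text _ _
  unfold Spec_get_num_lengths get_num_lengths get_num_lengths_alt
  rw [loopA_eq_build, List.nil_append]
  exact build_zero _ (pvSegs_ne_nil _)
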